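-- pv_equiv track=rewrite | github.com/chrishamblin7/viscnn | visualizer_scripts/visualizer_helper_functions.py | get_edge_from_curvenumber
-- ===== SOURCE A (Python) =====
-- def get_edge_from_curvenumber(curvenum, edge_names, num_layers):
-- 	edgenum = curvenum-(1+num_layers)
-- 	curve=0
-- 	for layer in range(len(edge_names)):
-- 		for i in range(len(edge_names[layer])):
-- 			if curve==edgenum:
-- 				return layer, i, edge_names[layer][i]
-- 			curve+=1
-- 	return None,None,None
-- ===== SOURCE B (Python) =====
-- def get_edge_from_curvenumber(curvenum, edge_names, num_layers):
--     k = curvenum - (1 + num_layers)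
--     if k < 0:
--         return None, None, None
--     for layer, names in enumerate(edge_names):
--         if k < len(names):
--             return layer, k, names[k]
--         k -= len(names)
--     return None, None, None
-- ===== Notes on version B (the rewrite author's own statement) =====
-- stated objective: alternative
-- what changed: Replaces the per-element counting scan with a per-layer walk that subtracts each layer's length from the target index (plus an early return for negative indices); it trades the element-by-element counter for layer-length arithmetic.
import Mathlib
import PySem

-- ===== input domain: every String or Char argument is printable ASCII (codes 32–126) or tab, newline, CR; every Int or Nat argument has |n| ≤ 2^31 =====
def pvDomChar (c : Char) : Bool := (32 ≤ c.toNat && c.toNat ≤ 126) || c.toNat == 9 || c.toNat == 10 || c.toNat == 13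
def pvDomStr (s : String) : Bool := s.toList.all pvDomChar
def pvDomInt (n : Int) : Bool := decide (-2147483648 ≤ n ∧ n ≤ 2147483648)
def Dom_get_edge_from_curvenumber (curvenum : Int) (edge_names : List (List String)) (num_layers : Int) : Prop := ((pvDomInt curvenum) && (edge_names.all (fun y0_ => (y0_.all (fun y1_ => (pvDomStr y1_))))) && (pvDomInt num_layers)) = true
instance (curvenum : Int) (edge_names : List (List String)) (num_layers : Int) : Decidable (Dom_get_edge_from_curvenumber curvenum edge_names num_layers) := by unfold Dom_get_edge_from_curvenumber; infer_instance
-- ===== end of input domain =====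

-- B replaces A's per-element counting scan with a per-layer walk that subtracts layer lengths from the target index (alternative decomposition).


-- ===== PORT A =====
-- inner loop: for i in range(len(names)): if curve==edgenum: return (layer,i,names[i]); curve+=1
-- (structural recursion over names carries i and curve, so names[i] is the current head)
def pvInnerA (layer edgenum : Int) (names : List String) (i curve : Int) :
    Option (Option Int × Option Int × Option String) × Int :=
  match names with
  | [] => (none, curve)
  | n :: rest =>
    if curve == edgenum then (some (some layer, some i, some n), curve)
    else pvInnerA layer edgenum rest (i + 1) (curve + 1)

-- outer loop: for layer in range(len(edge_names))
def pvOuterA (edgenum : Int) (layers : List (List String)) (layer curve : Int) :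
    Option Int × Option Int × Option String :=
  match layers with
  | [] => (none, none, none)
  | l :: rest =>
    match pvInnerA layer edgenum l 0 curve with
    | (some r, _) => r
    | (none, curve') => pvOuterA edgenum rest (layer + 1) curve'

def get_edge_from_curvenumber (curvenum : Int) (edge_names : List (List String)) (num_layers : Int) : Option Int × Option Int × Option String :=
  pvOuterA (curvenum - (1 + num_layers)) edge_names 0 0

-- ===== PORT B =====
-- per-layer walk: if k < len(names) return (layer,k,names[k]) else k -= len(names)
def pvGoB (layers : List (List String)) (layer k : Int) :
    Option Int × Option Int × Option String :=
  match layers with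
  | [] => (none, none, none)
  | names :: rest =>
    if k < (names.length : Int) then (some layer, some k, PySem.List.pyGet? names k)
    else pvGoB rest (layer + 1) (k - names.length)

def get_edge_from_curvenumber_alt (curvenum : Int) (edge_names : List (List String)) (num_layers : Int) : Option Int × Option Int × Option String :=
  let k := curvenum - (1 + num_layers)
  if k < 0 then (none, none, none) else pvGoB edge_names 0 k

-- ===== PRECONDITION & SPEC =====
def Spec_get_edge_from_curvenumber (curvenum : Int) (edge_names : List (List String)) (num_layers : Int) (out : Option Int × Option Int × Option String) : Prop := out = get_edge_from_curvenumber_alt curvenum edge_names num_layers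
instance (curvenum : Int) (edge_names : List (List String)) (num_layers : Int) (out : Option Int × Option Int × Option String) : Decidable (Spec_get_edge_from_curvenumber curvenum edge_names num_layers out) := by unfold Spec_get_edge_from_curvenumber; infer_instance

-- ===== CLAIM (what is proved, stated in full; the proofs are below) =====
def Claim_equal_get_edge_from_curvenumber : Prop := ∀ (curvenum : Int) (edge_names : List (List String)) (num_layers : Int), Dom_get_edge_from_curvenumber curvenum edge_names num_layers → Spec_get_edge_from_curvenumber curvenum edge_names num_layers (get_edge_from_curvenumber curvenum edge_names num_layers)

-- ===== LEMMAS AND PROOFS =====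
lemma pvInnerA_eq (layer edgenum : Int) :
    ∀ (names : List String) (i curve : Int),
      pvInnerA layer edgenum names i curve =
        if curve ≤ edgenum ∧ edgenum - curve < (names.length : Int) then
          (some (some layer, some (i + (edgenum - curve)), PySem.List.pyGet? names (edgenum - curve)), edgenum)
        else (none, curve + names.length) := by
  intro names
  induction names with
  | nil => intro i curve; simp [pvInnerA]
  | cons n rest ih =>
    intro i curve
    simp only [pvInnerA]
    by_cases h : curve = edgenum
    · subst h
      simp only [beq_self_eq_true, if_true]
      rw [if_pos ⟨le_refl _, by simp⟩, sub_self, add_zero,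
        PySem.List.pyGet?_zero_cons]
    · rw [if_neg (show ¬ ((curve == edgenum) = true) by simpa using h)]
      rw [ih]
      by_cases h2 : curve + 1 ≤ edgenum ∧ edgenum - (curve + 1) < (rest.length : Int)
      · rw [if_pos h2, if_pos (by simp only [List.length_cons]; push_cast; omega)]
        have hk : edgenum - curve = (edgenum - (curve + 1)) + 1 := by omega
        have hnn : 0 ≤ edgenum - (curve + 1) := by omega
        obtain ⟨m, hm⟩ := Int.eq_ofNat_of_zero_le hnn
        have hidx : i + 1 + (edgenum - (curve + 1)) = i + (edgenum - curve) := by omega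
        have hget : PySem.List.pyGet? (n :: rest) (edgenum - curve)
            = PySem.List.pyGet? rest (edgenum - (curve + 1)) := by
          rw [hk, hm, PySem.List.pyGet?_cons_succ]
        rw [hidx, hget]
      · rw [if_neg h2]
        rw [if_neg (show ¬(curve ≤ edgenum ∧ edgenum - curve < ((n :: rest).length : Int)) by
          simp only [List.length_cons]; push_cast; omega)]
        have hlen : (((n :: rest).length : Int)) = (rest.length : Int) + 1 := by
          simp
        rw [hlen]
        congr 1
        omega

lemma pvOuterA_eq (edgenum : Int) :
    ∀ (layers : List (List String)) (layer curve : Int),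
      pvOuterA edgenum layers layer curve =
        if edgenum - curve < 0 then (none, none, none)
        else pvGoB layers layer (edgenum - curve) := by
  intro layers
  induction layers with
  | nil => intro layer curve; simp [pvOuterA, pvGoB]
  | cons names rest ih =>
    intro layer curve
    simp only [pvOuterA, pvInnerA_eq]
    by_cases h : curve ≤ edgenum ∧ edgenum - curve < (names.length : Int)
    · rw [if_pos h]
      dsimp only
      rw [if_neg (by omega), pvGoB, if_pos h.2]
      simp
    · rw [if_neg h]
      dsimp only
      rw [ih]
      by_cases hneg : edgenum - curve < 0
      · rw [if_pos (by omega), if_pos hneg]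
      · rw [if_neg (by omega), if_neg hneg, pvGoB,
          if_neg (by omega)]
        congr 1
        omega

-- ===== VERDICT (by name: the statement is the Claim_ definition above) =====
theorem get_edge_from_curvenumber_spec : Claim_equal_get_edge_from_curvenumber := by
  intro curvenum edge_names num_layers _
  unfold Spec_get_edge_from_curvenumber get_edge_from_curvenumber get_edge_from_curvenumber_alt
  rw [pvOuterA_eq]
  simp
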